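-- pv_equiv track=rewrite | github.com/Doggzone/pppython | solution/chap5sol.py | reduce_diff
-- ===== SOURCE A (Python) =====
-- def reduce_diff(ns):
--     if len(ns) > 1:
--         if ns[0] < ns[1]:
--             return [ns[0]+1] + reduce_diff(ns[1:])
--         elif ns[0] > ns[1]:
--             return [ns[0]-1] + reduce_diff(ns[1:])
--         else:
--             return [ns[0]] + reduce_diff(ns[1:])
--     else:
--         return ns
-- ===== SOURCE B (Python) =====
-- def reduce_diff(ns):
--     out = [a + (a < b) - (a > b) for a, b in zip(ns, ns[1:])]
--     out.extend(ns[len(out):])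
--     return out
-- ===== Notes on version B (the rewrite author's own statement) =====
-- stated objective: faster
-- what changed: Replaced the recursion with repeated list slicing and concatenation by a single comprehension over adjacent pairs (zip) plus appending the untouched tail.
import Mathlib
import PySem

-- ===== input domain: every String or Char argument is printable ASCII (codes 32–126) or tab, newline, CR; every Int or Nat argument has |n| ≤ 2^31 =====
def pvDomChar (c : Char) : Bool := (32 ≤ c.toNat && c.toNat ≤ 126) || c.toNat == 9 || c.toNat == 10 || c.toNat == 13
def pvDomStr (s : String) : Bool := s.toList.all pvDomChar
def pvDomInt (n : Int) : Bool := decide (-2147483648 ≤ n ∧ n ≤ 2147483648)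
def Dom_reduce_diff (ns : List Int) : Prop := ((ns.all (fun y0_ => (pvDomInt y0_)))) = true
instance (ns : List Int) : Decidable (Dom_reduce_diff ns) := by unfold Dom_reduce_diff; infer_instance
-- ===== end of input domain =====

-- B changes A's recursive slice-and-concatenate into one linear pass over adjacent pairs (asymptotically faster).

-- ===== PORT A =====
-- Literal port of A: recursion on the list, 'ns[1:]' is the tail.
def reduce_diff (ns : List Int) : List Int :=
  match ns with
  | a :: b :: rest =>
      if a < b then (a + 1) :: reduce_diff (b :: rest)
      else if a > b then (a - 1) :: reduce_diff (b :: rest)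
      else a :: reduce_diff (b :: rest)
  | ns => ns

-- ===== PORT B =====
-- Port of Source B: comprehension over zip(ns, ns[1:]) then extend with ns[len(out):].
def reduce_diff_alt (ns : List Int) : List Int :=
  let out := List.zipWith
    (fun a b => a + (if a < b then (1 : Int) else 0) - (if a > b then (1 : Int) else 0))
    ns (ns.drop 1)
  out ++ ns.drop out.length

-- ===== PRECONDITION & SPEC =====
def Spec_reduce_diff (ns : List Int) (out : List Int) : Prop := out = reduce_diff_alt ns
instance (ns : List Int) (out : List Int) : Decidable (Spec_reduce_diff ns out) := by unfold Spec_reduce_diff; infer_instance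

-- ===== CLAIM (what is proved, stated in full; the proofs are below) =====
def Claim_equal_reduce_diff : Prop := ∀ (ns : List Int), Dom_reduce_diff ns → Spec_reduce_diff ns (reduce_diff ns)

-- ===== LEMMAS AND PROOFS =====
theorem reduce_diff_eq_alt (ns : List Int) : reduce_diff ns = reduce_diff_alt ns := by
  match ns with
  | [] => rfl
  | [a] => rfl
  | a :: b :: rest =>
      have ih := reduce_diff_eq_alt (b :: rest)
      simp only [reduce_diff, reduce_diff_alt, List.zipWith, List.drop] at *
      rcases lt_trichotomy a b with h | h | h
      · simp [h, not_lt.mpr h.le, ih]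
      · simp [h, ih]
      · simp [not_lt.mpr h.le, h, ih]

-- ===== VERDICT (by name: the statement is the Claim_ definition above) =====
theorem reduce_diff_spec : Claim_equal_reduce_diff := by
  intro ns _
  exact reduce_diff_eq_alt ns
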